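-- pv_equiv track=rewrite | github.com/farodoc/Algorithms-and-Data-Structures-AGH-UST | Random tasks/Even more random/2022_zadB1.py | szukanieCiagu
-- ===== SOURCE A (Python) =====
-- def szukanieCiagu(t):
--     n = len(t)
--     maxPoczatek = 0
--     minKoniec = 10**6
--
--     i = 0
--     while i < n:
--         if i + 1 < n:
--             if t[i] < t[i + 1]:
--                 tempMaxPoczatek = t[i]
--                 koniec = i + 1
--                 tempDl = 2
--                 while koniec + 1 < n and t[koniec] < t[koniec + 1]:
--                     koniec += 1
--                     tempDl += 1
--
--                 if tempDl > 2:
--                     maxPoczatek = max(maxPoczatek, tempMaxPoczatek)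
--                     minKoniec = min(minKoniec, t[koniec])
--
--                 i = koniec + 1
--
--             else:
--                 i += 1
--
--         else:
--             break
--
--     return maxPoczatek > minKoniec
-- ===== SOURCE B (Python) =====
-- def szukanieCiagu(t):
--     starts = []
--     ends = []
--     if not t:
--         return max([0]) > min([10**6])
--     runStart = t[0]
--     prev = t[0]
--     runLen = 1
--     for x in t[1:]:
--         if prev < x:
--             runLen += 1
--         else:
--             if runLen >= 3:
--                 starts.append(runStart)
--                 ends.append(prev)
--             runStart = x
--             runLen = 1
--         prev = x
--     if runLen >= 3:
--         starts.append(runStart)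
--         ends.append(prev)
--     return max([0] + starts) > min([10**6] + ends)
-- ===== Notes on version B (the rewrite author's own statement) =====
-- stated objective: simpler
-- what changed: Replaced A's index-jumping outer loop with a nested run-extension inner loop and inline max/min folding by a single flat element-wise scan that collects each long run's start and end value into two lists and compares the seeded maximum of the starts against the seeded minimum of the ends at the end.
import Mathlib
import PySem

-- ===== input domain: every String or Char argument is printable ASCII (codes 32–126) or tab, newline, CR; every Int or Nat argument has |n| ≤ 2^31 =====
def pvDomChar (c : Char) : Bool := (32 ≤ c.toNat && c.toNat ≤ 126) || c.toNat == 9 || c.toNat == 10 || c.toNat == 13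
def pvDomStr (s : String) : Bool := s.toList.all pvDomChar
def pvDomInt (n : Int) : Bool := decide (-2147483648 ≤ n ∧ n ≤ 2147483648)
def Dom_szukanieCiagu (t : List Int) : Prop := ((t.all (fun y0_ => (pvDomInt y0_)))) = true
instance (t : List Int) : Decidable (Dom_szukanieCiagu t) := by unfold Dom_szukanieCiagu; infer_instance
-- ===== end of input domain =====

-- B replaces A's index-jumping outer loop + inner run-extension loop by a flat element-wise
-- scan that collects each long run's start and end into two lists and aggregates at the end
-- (objective: simpler decomposition, same O(n) cost).

-- ===== PORT A =====
-- inner while loop: extends koniec/tempDl while the run keeps ascending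
-- (fuel = remaining length bound, only making the while loop structural; never exhausted)
def aInner (t : List Int) : Nat → Nat → Nat → Nat × Nat
  | 0, koniec, dl => (koniec, dl)
  | fuel + 1, koniec, dl =>
      if koniec + 1 < t.length ∧ t.getD koniec 0 < t.getD (koniec + 1) 0 then
        aInner t fuel (koniec + 1) (dl + 1)
      else (koniec, dl)

-- outer while loop of A (same fuel discipline)
def aOuter (t : List Int) : Nat → Nat → Int → Int → Bool
  | 0, _, mp, mk => decide (mp > mk)
  | fuel + 1, i, mp, mk =>
      if i < t.length then
        if i + 1 < t.length then
          if t.getD i 0 < t.getD (i + 1) 0 then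
            let k := (aInner t t.length (i + 1) 2).1
            let d := (aInner t t.length (i + 1) 2).2
            if 2 < d then aOuter t fuel (k + 1) (max mp (t.getD i 0)) (min mk (t.getD k 0))
            else aOuter t fuel (k + 1) mp mk
          else aOuter t fuel (i + 1) mp mk
        else decide (mp > mk)
      else decide (mp > mk)

def szukanieCiagu (t : List Int) : Bool := aOuter t (t.length + 1) 0 0 (10 ^ 6)

-- ===== PORT B =====
-- the for-loop of Source B: prev/runStart/runLen state, appending to starts/ends at run breaks
def bLoop (prev runStart : Int) (runLen : Nat) (starts ends : List Int) :
    List Int → List Int × List Int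
  | [] => if 3 ≤ runLen then (starts ++ [runStart], ends ++ [prev]) else (starts, ends)
  | x :: rest =>
      if prev < x then bLoop x runStart (runLen + 1) starts ends rest
      else if 3 ≤ runLen then bLoop x x 1 (starts ++ [runStart]) (ends ++ [prev]) rest
      else bLoop x x 1 starts ends rest

def szukanieCiagu_alt (t : List Int) : Bool :=
  match t with
  | [] => decide ((0 : Int) > 10 ^ 6)
  | x :: rest =>
      let p := bLoop x x 1 [] [] rest
      decide (p.1.foldl max 0 > p.2.foldl min (10 ^ 6))

-- ===== PRECONDITION & SPEC =====
def Spec_szukanieCiagu (t : List Int) (out : Bool) : Prop := out = szukanieCiagu_alt t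
instance (t : List Int) (out : Bool) : Decidable (Spec_szukanieCiagu t out) := by unfold Spec_szukanieCiagu; infer_instance

-- ===== CLAIM (what is proved, stated in full; the proofs are below) =====
def Claim_equal_szukanieCiagu : Prop := ∀ (t : List Int), Dom_szukanieCiagu t → Spec_szukanieCiagu t (szukanieCiagu t)

-- ===== LEMMAS AND PROOFS =====

theorem aInner_fst_ge (t : List Int) : ∀ (fuel koniec dl : Nat), koniec ≤ (aInner t fuel koniec dl).1 := by
  intro fuel
  induction fuel with
  | zero => intro koniec dl; simp [aInner]
  | succ fuel ih =>
      intro koniec dl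
      rw [aInner]
      split
      · exact le_trans (Nat.le_succ _) (ih (koniec + 1) (dl + 1))
      · exact le_refl _

theorem aOuter_out (t : List Int) : ∀ (fuel i : Nat) (mp mk : Int), ¬ i < t.length →
    aOuter t fuel i mp mk = decide (mp > mk) := by
  intro fuel i mp mk h
  cases fuel with
  | zero => rfl
  | succ fuel => rw [aOuter, if_neg h]

-- reference: B's scan with the max/min folded inline instead of collected in lists
def refRun (runStart prev : Int) (len : Nat) (mp mk : Int) : List Int → Int × Int
  | [] => if 3 ≤ len then (max mp runStart, min mk prev) else (mp, mk)
  | x :: rest =>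
      if prev < x then refRun runStart x (len + 1) mp mk rest
      else if 3 ≤ len then refRun x x 1 (max mp runStart) (min mk prev) rest
      else refRun x x 1 mp mk rest

theorem bLoop_ref (rest : List Int) : ∀ (prev runStart : Int) (len : Nat)
    (starts ends : List Int) (mp mk : Int),
    ((bLoop prev runStart len starts ends rest).1.foldl max mp,
     (bLoop prev runStart len starts ends rest).2.foldl min mk)
      = refRun runStart prev len (starts.foldl max mp) (ends.foldl min mk) rest := by
  induction rest with
  | nil =>
      intro prev runStart len starts ends mp mk
      simp only [bLoop, refRun]
      split <;> simp
  | cons x rest ih =>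
      intro prev runStart len starts ends mp mk
      simp only [bLoop, refRun]
      split
      · exact ih x runStart (len + 1) starts ends mp mk
      · split
        · have := ih x x 1 (starts ++ [runStart]) (ends ++ [prev]) mp mk
          simpa using this
        · exact ih x x 1 starts ends mp mk

theorem drop_succ_cons (t : List Int) (i : Nat) (h : i < t.length) :
    t.drop i = t.getD i 0 :: t.drop (i + 1) := by
  rw [List.getD_eq_getElem t 0 h]
  exact List.drop_eq_getElem_cons h

theorem run_lemma (t : List Int) : ∀ (fuel koniec dl : Nat) (mp mk start : Int),
    t.length - koniec ≤ fuel → koniec < t.length →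
    refRun start (t.getD koniec 0) dl mp mk (t.drop (koniec + 1)) =
      (let k := (aInner t fuel koniec dl).1
       let d := (aInner t fuel koniec dl).2
       let mp' := if 2 < d then max mp start else mp
       let mk' := if 2 < d then min mk (t.getD k 0) else mk
       if k + 1 < t.length then
         refRun (t.getD (k + 1) 0) (t.getD (k + 1) 0) 1 mp' mk' (t.drop (k + 2))
       else (mp', mk')) := by
  intro fuel
  induction fuel with
  | zero => intro koniec dl mp mk start hf hk; omega
  | succ fuel ih =>
      intro koniec dl mp mk start hf hk
      rw [aInner]
      by_cases hc : koniec + 1 < t.length ∧ t.getD koniec 0 < t.getD (koniec + 1) 0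
      · rw [if_pos hc]
        rw [drop_succ_cons t (koniec + 1) hc.1]
        simp only [refRun, if_pos hc.2]
        exact ih (koniec + 1) (dl + 1) mp mk start (by omega) hc.1
      · rw [if_neg hc]
        by_cases hk1 : koniec + 1 < t.length
        · have hlt : ¬ t.getD koniec 0 < t.getD (koniec + 1) 0 := fun h => hc ⟨hk1, h⟩
          rw [drop_succ_cons t (koniec + 1) hk1]
          simp only [refRun, if_neg hlt, if_pos hk1]
          by_cases h3 : 3 ≤ dl
          · rw [if_pos h3, if_pos (show 2 < dl from h3), if_pos (show 2 < dl from h3)]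
          · rw [if_neg h3, if_neg (show ¬ 2 < dl from h3), if_neg (show ¬ 2 < dl from h3)]
        · have : t.drop (koniec + 1) = [] := List.drop_eq_nil_of_le (by omega)
          rw [this]
          simp only [refRun, if_neg hk1]
          by_cases h3 : 3 ≤ dl
          · rw [if_pos h3, if_pos (show 2 < dl from h3), if_pos (show 2 < dl from h3)]
          · rw [if_neg h3, if_neg (show ¬ 2 < dl from h3), if_neg (show ¬ 2 < dl from h3)]

theorem main_lemma (t : List Int) : ∀ (fuel i : Nat) (mp mk : Int),
    t.length - i < fuel → i < t.length →
    aOuter t fuel i mp mk =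
      decide ((refRun (t.getD i 0) (t.getD i 0) 1 mp mk (t.drop (i + 1))).1 >
              (refRun (t.getD i 0) (t.getD i 0) 1 mp mk (t.drop (i + 1))).2) := by
  intro fuel
  induction fuel with
  | zero => intro i mp mk hf hi; omega
  | succ fuel ih =>
      intro i mp mk hf hi
      rw [aOuter, if_pos hi]
      by_cases h1 : i + 1 < t.length
      · rw [if_pos h1]
        by_cases h2 : t.getD i 0 < t.getD (i + 1) 0
        · rw [if_pos h2]
          rw [drop_succ_cons t (i + 1) h1]
          simp only [refRun, if_pos h2]
          have hrun := run_lemma t t.length (i + 1) 2 mp mk (t.getD i 0) (by omega) h1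
          rw [hrun]
          have hge := aInner_fst_ge t t.length (i + 1) 2
          set k := (aInner t t.length (i + 1) 2).1 with hkdef
          set d := (aInner t t.length (i + 1) 2).2 with hddef
          by_cases hd : 2 < d
          · rw [if_pos hd]
            simp only [if_pos hd]
            by_cases hk1 : k + 1 < t.length
            · rw [if_pos hk1]
              exact ih (k + 1) (max mp (t.getD i 0)) (min mk (t.getD k 0)) (by omega) hk1
            · rw [if_neg hk1]
              rw [aOuter_out t fuel (k + 1) _ _ hk1]
          · rw [if_neg hd]
            simp only [if_neg hd]
            by_cases hk1 : k + 1 < t.length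
            · rw [if_pos hk1]
              exact ih (k + 1) mp mk (by omega) hk1
            · rw [if_neg hk1]
              rw [aOuter_out t fuel (k + 1) _ _ hk1]
        · rw [if_neg h2]
          rw [drop_succ_cons t (i + 1) h1]
          simp only [refRun, if_neg h2]
          have h3 : ¬ (3 : Nat) ≤ 1 := by omega
          rw [if_neg h3]
          exact ih (i + 1) mp mk (by omega) h1
      · rw [if_neg h1]
        have hd : t.drop (i + 1) = [] := List.drop_eq_nil_of_le (by omega)
        rw [decide_eq_decide, hd]
        simp only [refRun]
        norm_num

-- ===== VERDICT (by name: the statement is the Claim_ definition above) =====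
theorem szukanieCiagu_spec : Claim_equal_szukanieCiagu := by
  intro t _
  unfold Spec_szukanieCiagu szukanieCiagu szukanieCiagu_alt
  cases t with
  | nil =>
      simp [aOuter]
  | cons x rest =>
      have hm := main_lemma (x :: rest) ((x :: rest).length + 1) 0 0 (10 ^ 6)
        (by omega) (by simp)
      simp only [List.getD, List.getElem?_cons_zero, Option.getD_some, List.drop_succ_cons,
        List.drop_zero] at hm
      rw [hm]
      have hb := bLoop_ref rest x x 1 [] [] 0 (10 ^ 6)
      simp only [List.foldl_nil] at hb
      have h1 : (bLoop x x 1 [] [] rest).1.foldl max 0 = (refRun x x 1 0 (10 ^ 6) rest).1 :=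
        congrArg Prod.fst hb
      have h2 : (bLoop x x 1 [] [] rest).2.foldl min (10 ^ 6) = (refRun x x 1 0 (10 ^ 6) rest).2 :=
        congrArg Prod.snd hb
      rw [decide_eq_decide, h1, h2]
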